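-- pv_equiv track=rewrite | github.com/nivi1501/Hypercube | hypercube/randomCaches.py | processingSecondKeyByte
-- ===== SOURCE A (Python) =====
-- BYTE_RANGE = 256
--
-- def processingSecondKeyByte(keyByte, actual_virtual_to_physical_map):
--     # Initialize a dictionary to store the plaintext-physical node mapping
--     physical_node_to_plaintext_map = {}
--
--     # Vary the first plaintext byte from 0 to 255
--     for plaintext_byte in range(BYTE_RANGE):
--         # Calculate the virtual node as plaintext XOR key
--         virtual_node = plaintext_byte ^ keyByte
--
--         # Search for the physical node in the actual mapping using the hidden VN
--         physical_node = None
--         for node, virtuals in actual_virtual_to_physical_map.items():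
--             if virtual_node in virtuals:
--                 physical_node = node
--                 #break   # Earlier it was one PN for a VN, but now the attacker needs to check mltiple PNs
--
--                 # Record the plaintext associated with each physical node
--                 if physical_node is not None:
--                     # If the mapping does not exist, create a new entry
--                     if physical_node not in physical_node_to_plaintext_map:
--                         physical_node_to_plaintext_map[physical_node] = [plaintext_byte]
--                     else:
--                         # If the mapping exists, append the plaintext byte
--                         physical_node_to_plaintext_map[physical_node].append(plaintext_byte)
--
--     return physical_node_to_plaintext_map
-- ===== SOURCE B (Python) =====
-- BYTE_RANGE = 256
--
-- def processingSecondKeyByte(keyByte, actual_virtual_to_physical_map):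
--     # One pass over the map: recover each plaintext byte directly as v ^ keyByte
--     # (XOR is its own inverse), instead of scanning all 256 bytes against the map.
--     entries = []
--     for node, virtuals in actual_virtual_to_physical_map.items():
--         plaintexts = sorted({v ^ keyByte for v in virtuals
--                              if 0 <= (v ^ keyByte) < BYTE_RANGE})
--         if plaintexts:
--             entries.append((node, plaintexts))
--     # A inserts a node the first time one of its plaintext bytes is hit, i.e. the
--     # nodes come out ordered by their smallest plaintext byte (stable on ties).
--     entries.sort(key=lambda e: e[1][0])
--     return dict(entries)
-- ===== Notes on version B (the rewrite author's own statement) =====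
-- stated objective: faster
-- what changed: Instead of scanning all 256 plaintext bytes and, for each, the whole map (256 full passes), B makes one pass over the map and recovers each node's plaintext bytes directly as v ^ keyByte (XOR is self-inverse), keeping the sorted set of in-range values and ordering nodes by their smallest plaintext byte (stable), which reproduces A's dict insertion order.
import Mathlib
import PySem

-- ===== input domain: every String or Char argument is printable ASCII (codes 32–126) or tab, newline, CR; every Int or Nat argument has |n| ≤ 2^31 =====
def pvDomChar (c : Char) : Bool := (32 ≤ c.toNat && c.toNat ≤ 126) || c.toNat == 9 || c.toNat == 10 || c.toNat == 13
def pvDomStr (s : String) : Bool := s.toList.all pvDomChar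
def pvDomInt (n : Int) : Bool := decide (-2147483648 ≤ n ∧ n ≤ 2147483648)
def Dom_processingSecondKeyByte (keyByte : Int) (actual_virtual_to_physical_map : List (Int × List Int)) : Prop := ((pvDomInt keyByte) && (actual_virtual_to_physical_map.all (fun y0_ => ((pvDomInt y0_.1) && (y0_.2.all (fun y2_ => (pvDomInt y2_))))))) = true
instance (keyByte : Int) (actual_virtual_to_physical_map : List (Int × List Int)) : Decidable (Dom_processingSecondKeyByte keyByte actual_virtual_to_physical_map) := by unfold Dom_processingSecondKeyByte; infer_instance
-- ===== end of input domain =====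

-- B replaces A's scan of all 256 plaintext bytes against the whole map by one pass
-- over the map, recovering each plaintext byte directly as v ^ keyByte (objective: faster).

-- ===== PORT A =====
-- literal transliteration of A: for each plaintext byte 0..255, scan the map for
-- nodes whose virtuals contain plaintext ^ keyByte, and append the byte to that
-- node's entry (creating it on first hit).
def processingSecondKeyByte (keyByte : Int) (actual_virtual_to_physical_map : List (Int × List Int)) : List (Int × List Int) :=
  ((PySem.List.pyRange 0 256 1).foldl (fun d plaintext_byte =>
      actual_virtual_to_physical_map.foldl (fun d nv =>
        if PySem.Int.bxor plaintext_byte keyByte ∈ nv.2 then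
          -- physical_node = nv.1 (just assigned, so the 'is not None' test holds)
          match PySem.Dict.get? d nv.1 with
          | none => PySem.Dict.insert d nv.1 [plaintext_byte]          -- create new entry
          | some l => PySem.Dict.insert d nv.1 (l ++ [plaintext_byte]) -- append
        else d) d)
    PySem.Dict.empty).items

-- ===== PORT B =====
-- literal transliteration of B (Source B): per node, plaintexts = sorted({v ^ keyByte
-- for v in virtuals if 0 <= v ^ keyByte < 256}); keep non-empty entries, sort them
-- by their first (smallest) plaintext byte, and build the result dict.
def processingSecondKeyByte_alt (keyByte : Int) (actual_virtual_to_physical_map : List (Int × List Int)) : List (Int × List Int) :=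
  let entries := actual_virtual_to_physical_map.foldl (fun acc nv =>
    let plaintexts := PySem.List.sorted
      (PySem.Set.ofList ((nv.2.filter (fun v =>
          decide (0 ≤ PySem.Int.bxor v keyByte) && decide (PySem.Int.bxor v keyByte < 256))).map
        (fun v => PySem.Int.bxor v keyByte)))
      (fun x => x) false
    if plaintexts.isEmpty then acc else acc ++ [(nv.1, plaintexts)]) []
  -- entries.sort(key=lambda e: e[1][0]); every stored list is non-empty, so e[1][0] is its head
  let entries2 := PySem.List.sorted entries (fun e => e.2.headI) false
  (PySem.Dict.ofList entries2).items

-- ===== PRECONDITION & SPEC =====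
-- Pre_ excludes association lists with duplicate node keys: they cannot arise from
-- A's Python dict argument (a dict has unique keys), so the assoc-list behaviour on
-- them represents no Python input.
def Pre_processingSecondKeyByte (keyByte : Int) (actual_virtual_to_physical_map : List (Int × List Int)) : Prop :=
  (actual_virtual_to_physical_map.map Prod.fst).Nodup
instance (keyByte : Int) (actual_virtual_to_physical_map : List (Int × List Int)) : Decidable (Pre_processingSecondKeyByte keyByte actual_virtual_to_physical_map) := by unfold Pre_processingSecondKeyByte; infer_instance
def pvWitness_processingSecondKeyByte : Int × (List (Int × List Int)) := (5, [(0, [3, 4]), (1, [700, 3])])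
def Spec_processingSecondKeyByte (keyByte : Int) (actual_virtual_to_physical_map : List (Int × List Int)) (out : List (Int × List Int)) : Prop := out = processingSecondKeyByte_alt keyByte actual_virtual_to_physical_map
instance (keyByte : Int) (actual_virtual_to_physical_map : List (Int × List Int)) (out : List (Int × List Int)) : Decidable (Spec_processingSecondKeyByte keyByte actual_virtual_to_physical_map out) := by unfold Spec_processingSecondKeyByte; infer_instance

-- ===== CLAIM (what is proved, stated in full; the proofs are below) =====
def Claim_equal_processingSecondKeyByte : Prop := ∀ (keyByte : Int) (actual_virtual_to_physical_map : List (Int × List Int)), Dom_processingSecondKeyByte keyByte actual_virtual_to_physical_map → Pre_processingSecondKeyByte keyByte actual_virtual_to_physical_map → Spec_processingSecondKeyByte keyByte actual_virtual_to_physical_map (processingSecondKeyByte keyByte actual_virtual_to_physical_map)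

-- ===== LEMMAS AND PROOFS =====

-- Python-exact XOR cancels itself: (a ^ b) ^ b = a.
theorem pvBxorCancel (a b : Int) : PySem.Int.bxor (PySem.Int.bxor a b) b = a := by
  unfold PySem.Int.bxor
  by_cases ha : 0 ≤ a <;> by_cases hb : 0 ≤ b <;>
      simp only [ha, hb, if_true, if_false]
  · have h0 : (0:Int) ≤ ↑(a.toNat ^^^ b.toNat) := Int.natCast_nonneg _
    rw [if_pos h0, Int.toNat_natCast, Nat.xor_xor_cancel_right]; omega
  · rw [if_neg (by omega : ¬ (0:Int) ≤ -↑(a.toNat ^^^ (-b - 1).toNat) - 1)]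
    rw [(by omega : (-(-(↑(a.toNat ^^^ (-b - 1).toNat) : Int) - 1) - 1).toNat = a.toNat ^^^ (-b - 1).toNat)]
    rw [Nat.xor_xor_cancel_right]; omega
  · rw [if_neg (by omega : ¬ (0:Int) ≤ -↑((-a - 1).toNat ^^^ b.toNat) - 1)]
    rw [(by omega : (-(-(↑((-a - 1).toNat ^^^ b.toNat) : Int) - 1) - 1).toNat = (-a - 1).toNat ^^^ b.toNat)]
    rw [Nat.xor_xor_cancel_right]; omega
  · rw [if_pos (Int.natCast_nonneg _)]
    rw [Int.toNat_natCast, Nat.xor_xor_cancel_right]; omega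

-- the ascending list of plaintext bytes hitting virtual set V (A's per-node value)
def pvL (k : Int) (V : List Int) : List Int :=
  (PySem.List.pyRange 0 256 1).filter (fun p => decide (PySem.Int.bxor p k ∈ V))

-- the non-empty entries in map order, with their full plaintext lists
def pvEnts (k : Int) (m : List (Int × List Int)) : List (Int × List Int) :=
  m.filterMap (fun nv => if pvL k nv.2 = [] then none else some (nv.1, pvL k nv.2))

-- group of map entries whose smallest plaintext byte is p, values truncated below K
def pvGrpT (k K p : Int) (m : List (Int × List Int)) : List (Int × List Int) :=
  m.filterMap (fun nv => if (pvL k nv.2).head? = some p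
    then some (nv.1, (pvL k nv.2).filter (fun q => decide (q < K))) else none)

-- A's dict contents after processing plaintext bytes 0..K-1
def pvStateA (k K : Int) (m : List (Int × List Int)) : List (Int × List Int) :=
  (PySem.List.pyRange 0 K 1).flatMap (fun p => pvGrpT k K p m)

theorem pvL_pairwise (k : Int) (V : List Int) : (pvL k V).Pairwise (· < ·) :=
  (PySem.List.pairwise_lt_pyRange_one 0 256).filter _

theorem pvL_nodup (k : Int) (V : List Int) : (pvL k V).Nodup :=
  (pvL_pairwise k V).imp ne_of_lt

theorem pvL_mem (k : Int) (V : List Int) (p : Int) :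
    p ∈ pvL k V ↔ (0 ≤ p ∧ p < 256) ∧ PySem.Int.bxor p k ∈ V := by
  simp [pvL, PySem.List.mem_pyRange_one]

theorem pvL_sub (k : Int) (V : List Int) {p : Int} (hp : p ∈ pvL k V) : 0 ≤ p ∧ p < 256 :=
  ((pvL_mem k V p).1 hp).1

theorem pvHead_min {l : List Int} (hl : l.Pairwise (· < ·)) {h : Int} (hh : l.head? = some h)
    {q : Int} (hq : q ∈ l) : h ≤ q := by
  cases l with
  | nil => simp at hh
  | cons a t =>
    simp only [List.head?_cons, Option.some.injEq] at hh
    subst hh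
    rcases List.mem_cons.1 hq with rfl | hq
    · exact le_refl _
    · exact le_of_lt ((List.pairwise_cons.1 hl).1 q hq)

theorem pvL_head_min (k : Int) (V : List Int) {h : Int} (hh : (pvL k V).head? = some h)
    {q : Int} (hq : q ∈ pvL k V) : h ≤ q := pvHead_min (pvL_pairwise k V) hh hq

theorem pvL_head_mem (k : Int) (V : List Int) {h : Int} (hh : (pvL k V).head? = some h) :
    h ∈ pvL k V := by
  cases hl : pvL k V with
  | nil => rw [hl] at hh; simp at hh
  | cons a t => rw [hl] at hh; simp only [List.head?_cons, Option.some.injEq] at hh; simp [hh]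

theorem pvFilterSucc (K : Int) {l : List Int} (hl : l.Pairwise (· < ·)) :
    l.filter (fun q => decide (q < K + 1)) =
      l.filter (fun q => decide (q < K)) ++ (if K ∈ l then [K] else []) := by
  induction l with
  | nil => simp
  | cons a t ih =>
    have hat := (List.pairwise_cons.1 hl).1
    have iht := ih (List.pairwise_cons.1 hl).2
    by_cases haK : a < K
    · have h1 : a < K + 1 := by omega
      have h2 : K ∈ a :: t ↔ K ∈ t := by
        constructor
        · intro h; rcases List.mem_cons.1 h with rfl | h; omega; exact h
        · exact fun h => List.mem_cons_of_mem _ h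
      simp only [List.filter_cons, decide_eq_true_eq, h1, haK, if_pos, iht]
      rw [if_congr h2 rfl rfl]; simp
    · by_cases haK2 : a = K
      · subst haK2
        have hnt : ∀ q ∈ t, ¬ (q < a + 1) := fun q hq => by have := hat q hq; omega
        have hnt2 : ∀ q ∈ t, ¬ (q < a) := fun q hq => by have := hat q hq; omega
        have hf1 : t.filter (fun q => decide (q < a + 1)) = [] :=
          List.filter_eq_nil_iff.2 (fun q hq => by simpa using hnt q hq)
        have hf2 : t.filter (fun q => decide (q < a)) = [] :=
          List.filter_eq_nil_iff.2 (fun q hq => by simpa using hnt2 q hq)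
        have hKnt : a ∉ t := fun h => absurd (hat a h) (lt_irrefl a)
        simp [List.filter_cons, hf1, hf2, hKnt]
        exact hat
      · have haK3 : K < a := lt_of_le_of_ne (not_lt.1 haK) (Ne.symm haK2)
        have hKn : K ∉ a :: t := by
          intro h; rcases List.mem_cons.1 h with rfl | h
          · omega
          · have := hat K h; omega
        have hf1 : (a :: t).filter (fun q => decide (q < K + 1)) = [] :=
          List.filter_eq_nil_iff.2 (fun q hq => by
            rcases List.mem_cons.1 hq with rfl | hq
            · simp; omega
            · have := hat q hq; simp; omega)
        have hf2 : (a :: t).filter (fun q => decide (q < K)) = [] :=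
          List.filter_eq_nil_iff.2 (fun q hq => by
            rcases List.mem_cons.1 hq with rfl | hq
            · simp; omega
            · have := hat q hq; simp; omega)
        simp [hf1, hf2, hKn]
        exact ⟨haK3, fun q hq => lt_trans haK3 (hat q hq)⟩

theorem pvL_trunc_succ (k : Int) (V : List Int) (K : Int) :
    (pvL k V).filter (fun q => decide (q < K + 1)) =
      (pvL k V).filter (fun q => decide (q < K)) ++ (if K ∈ pvL k V then [K] else []) :=
  pvFilterSucc K (pvL_pairwise k V)

theorem pvL_trunc_head (k : Int) (V : List Int) (K : Int) (hh : (pvL k V).head? = some K) :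
    (pvL k V).filter (fun q => decide (q < K + 1)) = [K] := by
  cases hl : pvL k V with
  | nil => rw [hl] at hh; simp at hh
  | cons a t =>
    rw [hl] at hh; simp only [List.head?_cons, Option.some.injEq] at hh; subst hh
    have hp := pvL_pairwise k V
    rw [hl] at hp
    have hat := (List.pairwise_cons.1 hp).1
    have hf : t.filter (fun q => decide (q < a + 1)) = [] :=
      List.filter_eq_nil_iff.2 (fun q hq => by have := hat q hq; simp; omega)
    simp [List.filter_cons, hf]
    exact hat

theorem pvL_trunc_all (k : Int) (V : List Int) :
    (pvL k V).filter (fun q => decide (q < 256)) = pvL k V :=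
  List.filter_eq_self.2 (fun q hq => by have := pvL_sub k V hq; simp; omega)

-- B's per-node computation equals pvL
theorem pvB1 (k : Int) (V : List Int) :
    PySem.List.sorted
      (PySem.Set.ofList ((V.filter (fun v =>
          decide (0 ≤ PySem.Int.bxor v k) && decide (PySem.Int.bxor v k < 256))).map
        (fun v => PySem.Int.bxor v k)))
      (fun x => x) false = pvL k V := by
  apply PySem.List.sorted_eq_of_perm_of_pairwise_lt
  · apply (List.perm_ext_iff_of_nodup (pvL_nodup k V) (PySem.Set.nodup_ofList _)).2
    intro p
    rw [pvL_mem, PySem.Set.mem_ofList]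
    simp only [List.mem_map, List.mem_filter, Bool.and_eq_true, decide_eq_true_eq]
    constructor
    · rintro ⟨⟨hp0, hp1⟩, hpV⟩
      exact ⟨PySem.Int.bxor p k, ⟨hpV, by rw [pvBxorCancel]; omega,
        by rw [pvBxorCancel]; omega⟩, pvBxorCancel p k⟩
    · rintro ⟨v, ⟨hvV, h0, h1⟩, rfl⟩
      exact ⟨⟨h0, h1⟩, by rw [pvBxorCancel]; exact hvV⟩
  · exact pvL_pairwise k V

-- two entries of a key-nodup list sharing a key are equal
theorem pvKeyUniq {m : List (Int × List Int)} (hm : (m.map Prod.fst).Nodup)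
    {e e' : Int × List Int} (he : e ∈ m) (he' : e' ∈ m) (hk : e.1 = e'.1) : e = e' := by
  induction m with
  | nil => simp at he
  | cons a t ih =>
    simp only [List.map_cons, List.nodup_cons] at hm
    rcases List.mem_cons.1 he with he1 | he1 <;> rcases List.mem_cons.1 he' with he2 | he2
    · rw [he1, he2]
    · subst he1
      exact absurd (by rw [hk]; exact List.mem_map_of_mem he2) hm.1
    · subst he2
      exact absurd (by rw [← hk]; exact List.mem_map_of_mem he1) hm.1
    · exact ih hm.2 he1 he2

theorem pvFlatMapIfNil {α : Type} (ps : List Int) (c : Int → Bool) (x : α) (f : Int → List α)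
    (hc : ∀ p ∈ ps, c p = false) :
    (ps.flatMap (fun p => if c p then x :: f p else f p)) = ps.flatMap f := by
  induction ps with
  | nil => rfl
  | cons a t ih =>
    simp only [List.flatMap_cons, hc a List.mem_cons_self, Bool.false_eq_true, if_false,
      ih (fun p hp => hc p (List.mem_cons_of_mem _ hp))]

theorem pvPermInsert {α : Type} (ps : List Int) (c : Int → Bool) (x : α) (f : Int → List α)
    (hc : ps.countP c ≤ 1) :
    (ps.flatMap (fun p => if c p then x :: f p else f p)).Perm
      ((if ps.any c then [x] else []) ++ ps.flatMap f) := by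
  induction ps with
  | nil => simp
  | cons a t ih =>
    rw [List.countP_cons] at hc
    by_cases hca : c a = true
    · rw [if_pos hca] at hc
      have hct : ∀ p ∈ t, c p = false := by
        intro p hp
        by_contra h
        have hpos : 0 < t.countP c := List.countP_pos_iff.2 ⟨p, hp, by simpa using h⟩
        omega
      rw [List.flatMap_cons, pvFlatMapIfNil t c x f hct, if_pos hca]
      simp [List.any_cons, hca]
    · have hca' : c a = false := by simpa using hca
      rw [hca'] at hc
      have iht := ih (by simpa using hc)
      simp only [List.flatMap_cons, hca', Bool.false_eq_true, if_false, List.any_cons,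
        Bool.false_or]
      refine List.Perm.trans (iht.append_left (f a)) ?_
      rcases ht : t.any c
      · simp [ht]
      · simpa [ht] using (List.perm_middle (a := x) (l₁ := f a) (l₂ := t.flatMap f))

-- adding an entry in front of m adds at most its own item to pvStateA, up to permutation
theorem pvStateA_cons (k K : Int) (nv : Int × List Int) (m : List (Int × List Int)) :
    (pvStateA k K (nv :: m)).Perm
      ((if (PySem.List.pyRange 0 K 1).any (fun p => decide ((pvL k nv.2).head? = some p))
          then [(nv.1, (pvL k nv.2).filter (fun q => decide (q < K)))] else [])
        ++ pvStateA k K m) := by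
  unfold pvStateA pvGrpT
  have h : ∀ p : Int,
      ((nv :: m).filterMap (fun nv' => if (pvL k nv'.2).head? = some p
        then some (nv'.1, (pvL k nv'.2).filter (fun q => decide (q < K))) else none)) =
      (if decide ((pvL k nv.2).head? = some p)
        then (nv.1, (pvL k nv.2).filter (fun q => decide (q < K))) ::
          (m.filterMap (fun nv' => if (pvL k nv'.2).head? = some p
            then some (nv'.1, (pvL k nv'.2).filter (fun q => decide (q < K))) else none))
        else (m.filterMap (fun nv' => if (pvL k nv'.2).head? = some p
            then some (nv'.1, (pvL k nv'.2).filter (fun q => decide (q < K))) else none))) := by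
    intro p
    rw [List.filterMap_cons]
    by_cases hp : (pvL k nv.2).head? = some p <;> simp [hp]
  rw [List.flatMap_congr (fun p _ => h p)]
  apply pvPermInsert
  cases hh : (pvL k nv.2).head? with
  | none => simp
  | some h0 =>
    have hcg : ∀ p ∈ PySem.List.pyRange 0 K 1,
        (decide ((some h0 : Option Int) = some p) = true ↔ (p == h0) = true) := by
      intro p _
      simp only [decide_eq_true_eq, Option.some.injEq, beq_iff_eq]
      exact eq_comm
    rw [List.countP_congr hcg]
    have hcnt := List.nodup_iff_count_le_one.1 (PySem.List.nodup_pyRange_one 0 K) h0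
    simpa [List.count_eq_countP] using hcnt

-- keys of pvStateA come from m
theorem pvStateA_keys_sub (k K : Int) (m : List (Int × List Int)) {n : Int}
    (hn : n ∈ (pvStateA k K m).map Prod.fst) : n ∈ m.map Prod.fst := by
  simp only [pvStateA, pvGrpT, List.mem_map, List.mem_flatMap, List.mem_filterMap] at hn
  obtain ⟨e, ⟨p, _, nv, hnv, he⟩, rfl⟩ := hn
  by_cases hp : (pvL k nv.2).head? = some p
  · rw [if_pos hp] at he
    cases he
    show nv.1 ∈ m.map Prod.fst
    exact List.mem_map_of_mem hnv
  · rw [if_neg hp] at he; cases he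

theorem pvStateA_keys_nodup (k K : Int) (m : List (Int × List Int))
    (hm : (m.map Prod.fst).Nodup) : ((pvStateA k K m).map Prod.fst).Nodup := by
  induction m with
  | nil =>
    have : pvStateA k K [] = [] := by simp [pvStateA, pvGrpT]
    simp [this]
  | cons nv t ih =>
    simp only [List.map_cons, List.nodup_cons] at hm
    have hperm := (pvStateA_cons k K nv t).map Prod.fst
    rw [List.Perm.nodup_iff hperm]
    rcases ha : (PySem.List.pyRange 0 K 1).any (fun p => decide ((pvL k nv.2).head? = some p))
    · simpa using ih hm.2
    · have hnm : nv.1 ∉ (pvStateA k K t).map Prod.fst :=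
        fun h => hm.1 (pvStateA_keys_sub k K t h)
      simpa using List.nodup_cons.2 ⟨hnm, ih hm.2⟩

-- a key is in pvStateA k K m iff its entry's smallest plaintext byte is < K
theorem pvStateA_contains (k K : Int) (m : List (Int × List Int))
    (hm : (m.map Prod.fst).Nodup) {nv : Int × List Int} (hnv : nv ∈ m) :
    (nv.1 ∈ (pvStateA k K m).map Prod.fst) ↔
      ∃ h, (pvL k nv.2).head? = some h ∧ h ∈ PySem.List.pyRange 0 K 1 := by
  constructor
  · intro hn
    simp only [pvStateA, pvGrpT, List.mem_map, List.mem_flatMap, List.mem_filterMap] at hn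
    obtain ⟨e, ⟨p, hp, nv', hnv', he⟩, hfst⟩ := hn
    by_cases hph : (pvL k nv'.2).head? = some p
    · rw [if_pos hph] at he
      cases he
      have : nv' = nv := pvKeyUniq hm hnv' hnv hfst
      subst this
      exact ⟨p, hph, hp⟩
    · rw [if_neg hph] at he; cases he
  · rintro ⟨h, hh, hp⟩
    simp only [pvStateA, pvGrpT, List.mem_map, List.mem_flatMap, List.mem_filterMap]
    exact ⟨(nv.1, (pvL k nv.2).filter (fun q => decide (q < K))),
      ⟨h, hp, nv, hnv, by rw [if_pos hh]⟩, rfl⟩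

-- `any` over a key-nodup list reduces to the unique matching entry
theorem pvAnyKey (m : List (Int × List Int)) (hm : (m.map Prod.fst).Nodup)
    {nv : Int × List Int} (hnv : nv ∈ m) (q : Int × List Int → Bool) :
    (m.any (fun e => e.1 == nv.1 && q e)) = q nv := by
  rcases hq : q nv
  · rcases ha : m.any (fun e => e.1 == nv.1 && q e)
    · rfl
    · exfalso
      obtain ⟨e, he, hcond⟩ := List.any_eq_true.1 ha
      simp only [Bool.and_eq_true, beq_iff_eq] at hcond
      have : e = nv := pvKeyUniq hm he hnv hcond.1
      rw [this, hq] at hcond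
      exact Bool.false_ne_true hcond.2
  · exact List.any_eq_true.2 ⟨nv, hnv, by simp [hq]⟩

-- Dict helper facts (on association items with unique keys)
theorem pvContainsIff (d : PySem.Dict Int (List Int)) (n : Int) :
    PySem.Dict.contains d n = true ↔ n ∈ d.items.map Prod.fst := by
  simp only [PySem.Dict.contains, List.any_eq_true, List.mem_map, beq_iff_eq]

theorem pvGetNone (d : PySem.Dict Int (List Int)) (n : Int)
    (hc : PySem.Dict.contains d n = false) : PySem.Dict.get? d n = none := by
  simp only [PySem.Dict.get?, Option.map_eq_none_iff, List.find?_eq_none]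
  intro pr hpr
  simp only [PySem.Dict.contains] at hc
  have := List.any_eq_false.1 hc pr hpr
  simpa using this

theorem pvUpsertNew (d : PySem.Dict Int (List Int)) (n : Int) (w : List Int)
    (hc : PySem.Dict.contains d n = false) :
    (PySem.Dict.insert d n w).items = d.items ++ [(n, w)] := by
  simp [PySem.Dict.insert, hc]

theorem pvUpsertHit (K : Int) (d : PySem.Dict Int (List Int))
    (hd : (d.items.map Prod.fst).Nodup) {n : Int} {old : List Int}
    (hg : PySem.Dict.get? d n = some old) :
    (PySem.Dict.insert d n (old ++ [K])).items
      = d.items.map (fun pr => if pr.1 == n then (pr.1, pr.2 ++ [K]) else pr) := by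
  obtain ⟨pr0, hfind, hval⟩ : ∃ pr0, d.items.find? (fun p => p.1 == n) = some pr0 ∧ pr0.2 = old := by
    simp only [PySem.Dict.get?] at hg
    cases hf : d.items.find? (fun p => p.1 == n) with
    | none => rw [hf] at hg; cases hg
    | some pr0 => rw [hf] at hg; exact ⟨pr0, rfl, by simpa using hg⟩
  have hpr0mem : pr0 ∈ d.items := List.mem_of_find?_eq_some hfind
  have hpr0key : pr0.1 = n := by simpa using List.find?_some hfind
  have hcont : PySem.Dict.contains d n = true :=
    (pvContainsIff d n).2 (hpr0key ▸ List.mem_map_of_mem hpr0mem)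
  simp only [PySem.Dict.insert, hcont, if_pos]
  apply List.map_congr_left
  intro pr hpr
  by_cases h : pr.1 == n
  · have : pr = pr0 := pvKeyUniq hd hpr hpr0mem (by simpa [hpr0key] using h)
    subst this
    simp [h, hpr0key, hval]
  · simp [h]

-- the inner loop of A (one plaintext byte K) on an arbitrary dict
theorem pvInner (k K : Int) (ms : List (Int × List Int)) (d : PySem.Dict Int (List Int))
    (hms : (ms.map Prod.fst).Nodup) (hd : (d.items.map Prod.fst).Nodup) :
    (ms.foldl (fun d nv =>
        if PySem.Int.bxor K k ∈ nv.2 then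
          match PySem.Dict.get? d nv.1 with
          | none => PySem.Dict.insert d nv.1 [K]
          | some l => PySem.Dict.insert d nv.1 (l ++ [K])
        else d) d).items =
      d.items.map (fun pr => if ms.any (fun nv => nv.1 == pr.1 && decide (PySem.Int.bxor K k ∈ nv.2))
          then (pr.1, pr.2 ++ [K]) else pr)
      ++ (ms.filter (fun nv => decide (PySem.Int.bxor K k ∈ nv.2) && !(PySem.Dict.contains d nv.1))).map
          (fun nv => (nv.1, ([K] : List Int))) := by
  induction ms generalizing d with
  | nil => simp
  | cons nv ms ih =>
    simp only [List.map_cons, List.nodup_cons] at hms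
    simp only [List.foldl_cons]
    by_cases hhit : PySem.Int.bxor K k ∈ nv.2
    · rw [if_pos hhit]
      rcases hc : PySem.Dict.contains d nv.1 with _ | _
      · -- new key: the dict appends (nv.1, [K]) at the end
        have hni : nv.1 ∉ d.items.map Prod.fst := fun h => by
          rw [(pvContainsIff d nv.1).2 h] at hc; cases hc
        rw [pvGetNone d nv.1 hc]
        have hd' : (((PySem.Dict.insert d nv.1 [K]).items).map Prod.fst).Nodup := by
          rw [pvUpsertNew d nv.1 [K] hc, List.map_append]
          refine List.Nodup.append hd (by simp) ?_
          simpa using hni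
        rw [ih (PySem.Dict.insert d nv.1 [K]) hms.2 hd', pvUpsertNew d nv.1 [K] hc]
        rw [List.map_append]
        have e1 : (d.items.map (fun pr =>
            if ms.any (fun e => e.1 == pr.1 && decide (PySem.Int.bxor K k ∈ e.2))
            then (pr.1, pr.2 ++ [K]) else pr)) =
            (d.items.map (fun pr =>
            if (nv :: ms).any (fun e => e.1 == pr.1 && decide (PySem.Int.bxor K k ∈ e.2))
            then (pr.1, pr.2 ++ [K]) else pr)) := by
          apply List.map_congr_left
          intro pr hpr
          have hne : (nv.1 == pr.1) = false := by
            have : pr.1 ∈ d.items.map Prod.fst := List.mem_map_of_mem hpr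
            simp only [beq_eq_false_iff_ne, ne_eq]
            intro he; exact hni (he ▸ this)
          rw [List.any_cons, hne, Bool.false_and, Bool.false_or]
        have e2 : ([((nv.1, [K]) : Int × List Int)].map (fun pr =>
            if ms.any (fun e => e.1 == pr.1 && decide (PySem.Int.bxor K k ∈ e.2))
            then (pr.1, pr.2 ++ [K]) else pr)) = [(nv.1, [K])] := by
          have : (ms.any (fun e => e.1 == nv.1 && decide (PySem.Int.bxor K k ∈ e.2))) = false := by
            rcases h : ms.any (fun e => e.1 == nv.1 && decide (PySem.Int.bxor K k ∈ e.2))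
            · rfl
            · obtain ⟨e, he, hcond⟩ := List.any_eq_true.1 h
              simp only [Bool.and_eq_true, beq_iff_eq] at hcond
              exact absurd (hcond.1 ▸ List.mem_map_of_mem (f := Prod.fst) he) hms.1
          simp only [List.map_cons, List.map_nil]
          rw [this]
          simp
        have e3 : ms.filter (fun e => decide (PySem.Int.bxor K k ∈ e.2) &&
              !(PySem.Dict.contains (PySem.Dict.insert d nv.1 [K]) e.1)) =
            ms.filter (fun e => decide (PySem.Int.bxor K k ∈ e.2) &&
              !(PySem.Dict.contains d e.1)) := by
          apply List.filter_congr
          intro e he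
          have hne : e.1 ≠ nv.1 := fun h =>
            hms.1 (h ▸ List.mem_map_of_mem (f := Prod.fst) he)
          have : PySem.Dict.contains (PySem.Dict.insert d nv.1 [K]) e.1 =
              PySem.Dict.contains d e.1 := by
            simp only [PySem.Dict.contains, pvUpsertNew d nv.1 [K] hc, List.any_append]
            simp [hne]
            exact fun h => absurd h.symm hne
          rw [this]
        rw [e1, e2, e3]
        simp [List.filter_cons, hhit, hc, List.append_assoc]
      · -- existing key: its stored list gets K appended, in place
        obtain ⟨old, hold⟩ : ∃ old, PySem.Dict.get? d nv.1 = some old := by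
          simp only [PySem.Dict.contains, List.any_eq_true] at hc
          obtain ⟨pr, hpr, hb⟩ := hc
          cases hfnd : d.items.find? (fun p => p.1 == nv.1) with
          | none =>
            exact absurd (by simpa using List.find?_eq_none.1 hfnd pr hpr) (by simpa using hb)
          | some pr0 => exact ⟨pr0.2, by simp [PySem.Dict.get?, hfnd]⟩
        rw [hold]
        have hitems := pvUpsertHit K d hd hold
        have hd' : (((PySem.Dict.insert d nv.1 (old ++ [K])).items).map Prod.fst).Nodup := by
          rw [hitems]
          have : ((d.items.map (fun pr => if pr.1 == nv.1 then (pr.1, pr.2 ++ [K]) else pr)).map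
              Prod.fst) = d.items.map Prod.fst := by
            rw [List.map_map]
            apply List.map_congr_left
            intro pr _
            simp only [Function.comp_apply]
            split_ifs <;> rfl
          rw [this]; exact hd
        rw [ih (PySem.Dict.insert d nv.1 (old ++ [K])) hms.2 hd', hitems]
        have hkeys : ((PySem.Dict.insert d nv.1 (old ++ [K])).items).map Prod.fst =
            d.items.map Prod.fst := by
          rw [hitems, List.map_map]
          apply List.map_congr_left
          intro pr _
          simp only [Function.comp_apply]
          split_ifs <;> rfl
        have hck : ∀ n, PySem.Dict.contains (PySem.Dict.insert d nv.1 (old ++ [K])) n =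
            PySem.Dict.contains d n := by
          intro n
          simp only [PySem.Dict.contains]
          rw [show (fun p : Int × List Int => p.1 == n) = ((fun x => x == n) ∘ Prod.fst) from rfl,
            ← List.any_map, hkeys, List.any_map]
        have e4 : ms.filter (fun e => decide (PySem.Int.bxor K k ∈ e.2) &&
              !(PySem.Dict.contains (PySem.Dict.insert d nv.1 (old ++ [K])) e.1)) =
            ms.filter (fun e => decide (PySem.Int.bxor K k ∈ e.2) &&
              !(PySem.Dict.contains d e.1)) := by
          apply List.filter_congr
          intro e _
          rw [hck e.1]
        rw [e4, List.map_map]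
        have e1 : (d.items.map ((fun pr =>
            if ms.any (fun e => e.1 == pr.1 && decide (PySem.Int.bxor K k ∈ e.2))
            then (pr.1, pr.2 ++ [K]) else pr) ∘ (fun pr => if pr.1 == nv.1 then (pr.1, pr.2 ++ [K]) else pr))) =
            (d.items.map (fun pr =>
            if (nv :: ms).any (fun e => e.1 == pr.1 && decide (PySem.Int.bxor K k ∈ e.2))
            then (pr.1, pr.2 ++ [K]) else pr)) := by
          apply List.map_congr_left
          intro pr hpr
          by_cases h : pr.1 = nv.1
          · have hmsany : (ms.any (fun e => e.1 == pr.1 && decide (PySem.Int.bxor K k ∈ e.2))) = false := by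
              rcases hq : ms.any (fun e => e.1 == pr.1 && decide (PySem.Int.bxor K k ∈ e.2))
              · rfl
              · obtain ⟨e, he, hcond⟩ := List.any_eq_true.1 hq
                simp only [Bool.and_eq_true, beq_iff_eq] at hcond
                exact absurd ((hcond.1.trans h) ▸ List.mem_map_of_mem (f := Prod.fst) he) hms.1
            have hb : (pr.1 == nv.1) = true := by simpa using h
            have hb2 : (nv.1 == pr.1) = true := by simpa using h.symm
            have hh2 : decide (PySem.Int.bxor K k ∈ nv.2) = true := by simpa using hhit
            simp only [Function.comp_apply, List.any_cons, hb, hb2, hh2, Bool.true_and,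
              Bool.true_or, if_true, hmsany, Bool.false_eq_true, if_false]
          · have hb : (pr.1 == nv.1) = false := by simpa using h
            have hb2 : (nv.1 == pr.1) = false := by simpa using (Ne.symm h)
            simp only [Function.comp_apply, List.any_cons, hb, hb2, Bool.false_and,
              Bool.false_or, Bool.false_eq_true, if_false]
        rw [e1]
        have e3 : ms.filter (fun e => decide (PySem.Int.bxor K k ∈ e.2) &&
              !(PySem.Dict.contains d e.1)) =
            (nv :: ms).filter (fun e => decide (PySem.Int.bxor K k ∈ e.2) &&
              !(PySem.Dict.contains d e.1)) := by
          simp [List.filter_cons, hhit, hc]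
        rw [e3]
    · rw [if_neg hhit]
      rw [ih d hms.2 hd]
      have e1 : (d.items.map (fun pr =>
          if ms.any (fun e => e.1 == pr.1 && decide (PySem.Int.bxor K k ∈ e.2))
          then (pr.1, pr.2 ++ [K]) else pr)) =
          (d.items.map (fun pr =>
          if (nv :: ms).any (fun e => e.1 == pr.1 && decide (PySem.Int.bxor K k ∈ e.2))
          then (pr.1, pr.2 ++ [K]) else pr)) := by
        apply List.map_congr_left
        intro pr _
        have hh2 : decide (PySem.Int.bxor K k ∈ nv.2) = false := by simpa using hhit
        simp only [List.any_cons, hh2, Bool.and_false, Bool.false_or]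
      have e2 : (nv :: ms).filter (fun e => decide (PySem.Int.bxor K k ∈ e.2) &&
            !(PySem.Dict.contains d e.1)) =
          ms.filter (fun e => decide (PySem.Int.bxor K k ∈ e.2) &&
            !(PySem.Dict.contains d e.1)) := by
        simp [List.filter_cons, hhit]
      rw [e1, e2]

theorem pvFilterMapOfFilter (m : List (Int × List Int)) (c : Int × List Int → Bool)
    (g : Int × List Int → Int × List Int) :
    (m.filter c).map g = m.filterMap (fun nv => if c nv then some (g nv) else none) := by
  induction m with
  | nil => rfl
  | cons a t ih =>
    rw [List.filter_cons, List.filterMap_cons]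
    by_cases h : c a
    · rw [if_pos h, if_pos h, List.map_cons, ih]
    · rw [if_neg h, if_neg h, ih]

-- A's outer loop invariant
theorem pvOuter (k : Int) (m : List (Int × List Int)) (hm : (m.map Prod.fst).Nodup) (n : Nat)
    (hn : n ≤ 256) :
    ((PySem.List.pyRange 0 n 1).foldl (fun d p =>
        m.foldl (fun d nv =>
          if PySem.Int.bxor p k ∈ nv.2 then
            match PySem.Dict.get? d nv.1 with
            | none => PySem.Dict.insert d nv.1 [p]
            | some l => PySem.Dict.insert d nv.1 (l ++ [p])
          else d) d)
      PySem.Dict.empty).items = pvStateA k n m := by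
  induction n with
  | zero => simp [PySem.List.pyRange_one_eq_nil, pvStateA, PySem.Dict.empty]
  | succ n ihn =>
    have hn' : (n : Int) ≤ 256 := by exact_mod_cast Nat.le_of_succ_le hn
    have hrng : PySem.List.pyRange 0 ((n : Nat) + 1 : Nat) 1 =
        PySem.List.pyRange 0 (n : Nat) 1 ++ [(n : Int)] := by
      have := PySem.List.pyRange_one_succ_right (a := 0) (b := (n : Int)) (Int.natCast_nonneg n)
      push_cast
      push_cast at this
      exact this
    rw [hrng, List.foldl_append, List.foldl_cons, List.foldl_nil]
    set d := ((PySem.List.pyRange 0 (n : Nat) 1).foldl (fun d p =>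
        m.foldl (fun d nv =>
          if PySem.Int.bxor p k ∈ nv.2 then
            match PySem.Dict.get? d nv.1 with
            | none => PySem.Dict.insert d nv.1 [p]
            | some l => PySem.Dict.insert d nv.1 (l ++ [p])
          else d) d)
      PySem.Dict.empty) with hdd
    have hitems : d.items = pvStateA k (n : Nat) m := ihn (Nat.le_of_succ_le hn)
    have hdnodup : (d.items.map Prod.fst).Nodup := by
      rw [hitems]; exact pvStateA_keys_nodup k (n : Nat) m hm
    rw [pvInner k (n : Int) m d hm hdnodup, hitems]
    have hcontains : ∀ nv ∈ m, PySem.Dict.contains d nv.1 = true ↔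
        ∃ h, (pvL k nv.2).head? = some h ∧ h ∈ PySem.List.pyRange 0 (n : Nat) 1 := by
      intro nv hnv
      rw [pvContainsIff d nv.1, hitems]
      exact pvStateA_contains k (n : Nat) m hm hnv
    have hn0 : (0:Int) ≤ (n : Int) := Int.natCast_nonneg n
    have hn256 : (n : Int) < 256 := by exact_mod_cast hn
    have hmem : ∀ nv : Int × List Int,
        ((n : Int) ∈ pvL k nv.2) ↔ PySem.Int.bxor (n : Int) k ∈ nv.2 := by
      intro nv
      rw [pvL_mem]
      exact ⟨fun h => h.2, fun h => ⟨⟨hn0, hn256⟩, h⟩⟩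
    -- target: split the (n+1)-range
    have hsplit : pvStateA k ((n : Nat) + 1 : Nat) m =
        (PySem.List.pyRange 0 (n : Nat) 1).flatMap (fun p => pvGrpT k ((n : Int) + 1) p m)
          ++ pvGrpT k ((n : Int) + 1) (n : Int) m := by
      unfold pvStateA
      have h1 : (((n : Nat) + 1 : Nat) : Int) = (n : Int) + 1 := by push_cast; ring
      rw [h1, PySem.List.pyRange_one_succ_right (a := 0) (b := (n : Int)) hn0, List.flatMap_append]
      simp
    rw [hsplit]
    congr 1
    · -- mapped old entries = groups with values extended below n+1
      unfold pvStateA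
      rw [List.map_flatMap]
      apply List.flatMap_congr
      intro p hp
      unfold pvGrpT
      rw [List.map_filterMap]
      apply List.filterMap_congr
      intro nv hnv
      by_cases hph : (pvL k nv.2).head? = some p
      · rw [if_pos hph, if_pos hph]
        simp only [Option.map_some]
        rw [pvAnyKey m hm hnv (fun e => decide (PySem.Int.bxor (n : Int) k ∈ e.2))]
        have htr := pvL_trunc_succ k nv.2 (n : Int)
        by_cases hhit : PySem.Int.bxor (n : Int) k ∈ nv.2
        · have hd1 : decide (PySem.Int.bxor (n : Int) k ∈ nv.2) = true := by simpa using hhit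
          have hd2 : (n : Int) ∈ pvL k nv.2 := (hmem nv).2 hhit
          rw [hd1, if_pos rfl, htr, if_pos hd2]
        · have hd1 : decide (PySem.Int.bxor (n : Int) k ∈ nv.2) = false := by simpa using hhit
          have hd2 : (n : Int) ∉ pvL k nv.2 := fun h => hhit ((hmem nv).1 h)
          rw [hd1, htr, if_neg hd2, List.append_nil]
          simp
      · rw [if_neg hph, if_neg hph]
        simp
    · -- newly created entries = the group with smallest byte n
      rw [pvFilterMapOfFilter]
      unfold pvGrpT
      apply List.filterMap_congr
      intro nv hnv
      by_cases hph : (pvL k nv.2).head? = some (n : Int)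
      · have hd2 : (n : Int) ∈ pvL k nv.2 := pvL_head_mem k nv.2 hph
        have hd1 : decide (PySem.Int.bxor (n : Int) k ∈ nv.2) = true := by
          simpa using ((hmem nv).1 hd2)
        have hco : PySem.Dict.contains d nv.1 = false := by
          rcases hcc : PySem.Dict.contains d nv.1
          · rfl
          · obtain ⟨h, hh, hhr⟩ := (hcontains nv hnv).1 hcc
            rw [hph] at hh
            cases hh
            rw [PySem.List.mem_pyRange_one] at hhr
            omega
        rw [if_pos hph, hd1, hco]
        simp only [Bool.not_false, Bool.and_true, if_pos]
        rw [pvL_trunc_head k nv.2 (n : Int) hph]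
      · rw [if_neg hph]
        by_cases hhit : PySem.Int.bxor (n : Int) k ∈ nv.2
        · have hd2 : (n : Int) ∈ pvL k nv.2 := (hmem nv).2 hhit
          obtain ⟨h, hh⟩ : ∃ h, (pvL k nv.2).head? = some h := by
            cases hl : pvL k nv.2 with
            | nil => rw [hl] at hd2; cases hd2
            | cons a t => exact ⟨a, rfl⟩
          have hlt : h < (n : Int) := by
            have hle := pvL_head_min k nv.2 hh hd2
            have hne : h ≠ (n : Int) := fun he => hph (he ▸ hh)
            omega
          have h0h : 0 ≤ h := (pvL_sub k nv.2 (pvL_head_mem k nv.2 hh)).1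
          have hco : PySem.Dict.contains d nv.1 = true :=
            (hcontains nv hnv).2 ⟨h, hh, by rw [PySem.List.mem_pyRange_one]; omega⟩
          rw [hco]
          simp
        · have hd1 : decide (PySem.Int.bxor (n : Int) k ∈ nv.2) = false := by simpa using hhit
          rw [hd1]
          simp

theorem pvA_eq (k : Int) (m : List (Int × List Int)) (hm : (m.map Prod.fst).Nodup) :
    processingSecondKeyByte k m = pvStateA k 256 m := by
  unfold processingSecondKeyByte
  have h := pvOuter k m hm 256 (le_refl 256)
  norm_num at h
  exact h

theorem pvHeadI {α : Type} [Inhabited α] {l : List α} {p : α} (h : l.head? = some p) :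
    l.headI = p := by
  cases l with
  | nil => cases h
  | cons a t => simpa using h

-- stable insertion into a two-block list
theorem pvInsertBy_grouped {α : Type} (key : α → Int) (x : α) (ys1 ys2 : List α)
    (h1 : ∀ y ∈ ys1, ¬ key x < key y) (h2 : ∀ y ∈ ys2, key x < key y) :
    PySem.List.insertBy (fun a b => decide (key a < key b)) x (ys1 ++ ys2) = ys1 ++ x :: ys2 := by
  induction ys1 with
  | nil =>
    cases ys2 with
    | nil => rfl
    | cons y ys =>
      have hb : decide (key x < key y) = true := by simpa using h2 y List.mem_cons_self
      rw [List.nil_append,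
        show PySem.List.insertBy (fun a b => decide (key a < key b)) x (y :: ys) =
          if decide (key x < key y) then x :: y :: ys
          else y :: PySem.List.insertBy (fun a b => decide (key a < key b)) x ys from rfl,
        hb, if_pos rfl, List.nil_append]
  | cons z zs ih =>
    have hb : decide (key x < key z) = false := by simpa using h1 z List.mem_cons_self
    rw [List.cons_append,
      show PySem.List.insertBy (fun a b => decide (key a < key b)) x (z :: (zs ++ ys2)) =
        if decide (key x < key z) then x :: z :: (zs ++ ys2)
        else z :: PySem.List.insertBy (fun a b => decide (key a < key b)) x (zs ++ ys2) from rfl,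
      hb]
    simp only [Bool.false_eq_true, if_false]
    rw [ih (fun y hy => h1 y (List.mem_cons_of_mem _ hy)), List.cons_append]

-- stable sort by head of a list of entries with heads in [0,256) is grouping by head
theorem pvSortedGrouped (l : List (Int × List Int))
    (hl : ∀ e ∈ l, ∃ p, e.2.head? = some p ∧ 0 ≤ p ∧ p < 256) :
    PySem.List.sorted l (fun e => e.2.headI) false =
      (PySem.List.pyRange 0 256 1).flatMap (fun p => l.filter (fun e => e.2.head? == some p)) := by
  rw [PySem.List.sorted_eq_foldl_insertBy]
  revert hl
  induction l using List.reverseRecOn with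
  | nil => intro _; simp
  | append_singleton l x ih =>
    intro hl
    obtain ⟨p, hp, hp0, hp1⟩ := hl x (by simp)
    have hl' : ∀ e ∈ l, ∃ q, e.2.head? = some q ∧ 0 ≤ q ∧ q < 256 :=
      fun e he => hl e (List.mem_append_left _ he)
    rw [List.foldl_append, List.foldl_cons, List.foldl_nil, ih hl']
    have hkeyx : x.2.headI = p := pvHeadI hp
    -- split the byte range at p+1 on both sides
    have hsplitA : PySem.List.pyRange 0 256 1 =
        PySem.List.pyRange 0 (p + 1) 1 ++ PySem.List.pyRange (p + 1) 256 1 :=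
      PySem.List.pyRange_one_append 0 (p + 1) 256 (by omega) (by omega)
    have hkeymem : ∀ q : Int, ∀ y ∈ l.filter (fun e => e.2.head? == some q), y.2.headI = q := by
      intro q y hy
      have := (List.mem_filter.1 hy).2
      exact pvHeadI (by simpa using this)
    rw [hsplitA, List.flatMap_append, List.flatMap_append]
    rw [pvInsertBy_grouped (fun e => e.2.headI) x _ _
      (by
        intro y hy
        obtain ⟨q, hq, hyq⟩ := List.mem_flatMap.1 hy
        rw [PySem.List.mem_pyRange_one] at hq
        show ¬ x.2.headI < y.2.headI
        rw [hkeymem q y hyq, hkeyx]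
        omega)
      (by
        intro y hy
        obtain ⟨q, hq, hyq⟩ := List.mem_flatMap.1 hy
        rw [PySem.List.mem_pyRange_one] at hq
        show x.2.headI < y.2.headI
        rw [hkeymem q y hyq, hkeyx]
        omega)]
    have hfilr : ∀ q : Int, q ≠ p → ((l ++ [x]).filter (fun e => e.2.head? == some q)) =
        l.filter (fun e => e.2.head? == some q) := by
      intro q hq
      rw [List.filter_append]
      have : ([x].filter (fun e => e.2.head? == some q)) = [] := by
        simp only [List.filter_cons, List.filter_nil]
        rw [if_neg]
        simp only [beq_iff_eq, hp]
        exact fun h => hq (by injection h; omega)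
      rw [this, List.append_nil]
    have hA2 : (PySem.List.pyRange (p + 1) 256 1).flatMap
          (fun q => (l ++ [x]).filter (fun e => e.2.head? == some q)) =
        (PySem.List.pyRange (p + 1) 256 1).flatMap
          (fun q => l.filter (fun e => e.2.head? == some q)) := by
      apply List.flatMap_congr
      intro q hq
      rw [PySem.List.mem_pyRange_one] at hq
      exact hfilr q (by omega)
    simp only [hA2]
    have hsplitP : PySem.List.pyRange 0 (p + 1) 1 = PySem.List.pyRange 0 p 1 ++ [p] :=
      PySem.List.pyRange_one_succ_right (a := 0) (b := p) hp0
    rw [hsplitP, List.flatMap_append, List.flatMap_append]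
    have hA1 : (PySem.List.pyRange 0 p 1).flatMap
          (fun q => (l ++ [x]).filter (fun e => e.2.head? == some q)) =
        (PySem.List.pyRange 0 p 1).flatMap
          (fun q => l.filter (fun e => e.2.head? == some q)) := by
      apply List.flatMap_congr
      intro q hq
      rw [PySem.List.mem_pyRange_one] at hq
      exact hfilr q (by omega)
    simp only [hA1]
    have hAp : ([p] : List Int).flatMap (fun q => (l ++ [x]).filter (fun e => e.2.head? == some q)) =
        ([p] : List Int).flatMap (fun q => l.filter (fun e => e.2.head? == some q)) ++ [x] := by
      simp only [List.flatMap_cons, List.flatMap_nil, List.append_nil, List.filter_append]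
      congr 1
      simp [hp]
    simp only [hAp]
    simp [List.append_assoc]

theorem pvEnts_keys_sub (k : Int) (m : List (Int × List Int)) {e : Int × List Int}
    (he : e ∈ pvEnts k m) : e.1 ∈ m.map Prod.fst := by
  obtain ⟨nv, hnv, hif⟩ := List.mem_filterMap.1 he
  by_cases h : pvL k nv.2 = []
  · rw [if_pos h] at hif; cases hif
  · rw [if_neg h] at hif
    cases hif
    show nv.1 ∈ m.map Prod.fst
    exact List.mem_map_of_mem hnv

theorem pvEnts_keys_nodup (k : Int) (m : List (Int × List Int))
    (hm : (m.map Prod.fst).Nodup) : ((pvEnts k m).map Prod.fst).Nodup := by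
  induction m with
  | nil => simp [pvEnts]
  | cons nv t ih =>
    simp only [List.map_cons, List.nodup_cons] at hm
    have hstep : pvEnts k (nv :: t) = (if pvL k nv.2 = [] then pvEnts k t
        else (nv.1, pvL k nv.2) :: pvEnts k t) := by
      unfold pvEnts
      rw [List.filterMap_cons]
      by_cases h : pvL k nv.2 = []
      · rw [if_pos h, if_pos h]
      · rw [if_neg h, if_neg h]
    rw [hstep]
    by_cases h : pvL k nv.2 = []
    · rw [if_pos h]
      exact ih hm.2
    · rw [if_neg h]
      simp only [List.map_cons, List.nodup_cons]
      refine ⟨fun hcon => ?_, ih hm.2⟩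
      obtain ⟨e, he, hfst⟩ := List.mem_map.1 hcon
      exact hm.1 (hfst ▸ pvEnts_keys_sub k t he)

theorem pvEnts_prop (k : Int) (m : List (Int × List Int)) :
    ∀ e ∈ pvEnts k m, ∃ p, e.2.head? = some p ∧ 0 ≤ p ∧ p < 256 := by
  intro e he
  obtain ⟨nv, hnv, hif⟩ := List.mem_filterMap.1 he
  by_cases h : pvL k nv.2 = []
  · rw [if_pos h] at hif; cases hif
  · rw [if_neg h] at hif
    cases hif
    cases hl : pvL k nv.2 with
    | nil => exact absurd hl h
    | cons a t =>
      have ha : a ∈ pvL k nv.2 := by rw [hl]; exact List.mem_cons_self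
      have := pvL_sub k nv.2 ha
      exact ⟨a, rfl, this.1, this.2⟩

theorem pvUpdateItems : ∀ (l : List (Int × List Int)) (d : PySem.Dict Int (List Int)),
    (∀ pr ∈ l, PySem.Dict.contains d pr.1 = false) → ((l.map Prod.fst).Nodup) →
    (l.foldl (fun acc p => acc.insert p.1 p.2) d).items = d.items ++ l := by
  intro l
  induction l with
  | nil => intro d _ _; simp
  | cons a t ih =>
    intro d hc hn
    simp only [List.map_cons, List.nodup_cons] at hn
    simp only [List.foldl_cons]
    have hca : PySem.Dict.contains d a.1 = false := hc a List.mem_cons_self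
    have hnew := pvUpsertNew d a.1 a.2 hca
    have hckeys : ∀ pr ∈ t, PySem.Dict.contains (PySem.Dict.insert d a.1 a.2) pr.1 = false := by
      intro pr hpr
      have hne : (a.1 == pr.1) = false := by
        simp only [beq_eq_false_iff_ne, ne_eq]
        intro he
        exact hn.1 (he ▸ List.mem_map_of_mem (f := Prod.fst) hpr)
      simp only [PySem.Dict.contains, hnew, List.any_append, List.any_cons, List.any_nil,
        Bool.or_false]
      rw [hne]
      simp only [Bool.or_false]
      simpa [PySem.Dict.contains] using hc pr (List.mem_cons_of_mem _ hpr)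
    rw [ih (PySem.Dict.insert d a.1 a.2) hckeys hn.2, hnew, List.append_assoc]
    rfl

theorem pvOfListItems (l : List (Int × List Int)) (hn : (l.map Prod.fst).Nodup) :
    (PySem.Dict.ofList l).items = l := by
  have h := pvUpdateItems l PySem.Dict.empty (fun pr _ => rfl) hn
  simpa [PySem.Dict.ofList, PySem.Dict.update, PySem.Dict.empty] using h

theorem pvGroups_eq (k : Int) (m : List (Int × List Int)) :
    (PySem.List.pyRange 0 256 1).flatMap
        (fun p => (pvEnts k m).filter (fun e => e.2.head? == some p))
      = pvStateA k 256 m := by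
  unfold pvStateA
  apply List.flatMap_congr
  intro p hp
  unfold pvGrpT pvEnts
  rw [List.filter_filterMap]
  apply List.filterMap_congr
  intro nv _
  by_cases h0 : pvL k nv.2 = []
  · rw [if_pos h0]
    rw [if_neg (by rw [h0]; simp)]
    rfl
  · rw [if_neg h0]
    by_cases hh : (pvL k nv.2).head? = some p
    · rw [if_pos hh]
      simp [Option.filter, hh, pvL_trunc_all]
    · rw [if_neg hh]
      simp [Option.filter, hh]

theorem pvFoldEnts (k : Int) (m : List (Int × List Int)) : ∀ acc,
    m.foldl (fun acc nv => if (pvL k nv.2).isEmpty then acc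
        else acc ++ [(nv.1, pvL k nv.2)]) acc
      = acc ++ pvEnts k m := by
  induction m with
  | nil => intro acc; simp [pvEnts]
  | cons nv t ih =>
    intro acc
    unfold pvEnts
    rw [List.foldl_cons, List.filterMap_cons]
    by_cases h : pvL k nv.2 = []
    · rw [if_pos (by simp [h] : ((pvL k nv.2).isEmpty) = true), if_pos h]
      exact ih acc
    · rw [if_neg (by simp [h] : ¬ ((pvL k nv.2).isEmpty) = true), if_neg h]
      rw [ih (acc ++ [(nv.1, pvL k nv.2)]), List.append_assoc]
      rfl

theorem pvB_eq (k : Int) (m : List (Int × List Int)) (hm : (m.map Prod.fst).Nodup) :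
    processingSecondKeyByte_alt k m = pvStateA k 256 m := by
  unfold processingSecondKeyByte_alt
  have hfun : (fun (acc : List (Int × List Int)) (nv : Int × List Int) =>
      let plaintexts := PySem.List.sorted
        (PySem.Set.ofList ((nv.2.filter (fun v =>
            decide (0 ≤ PySem.Int.bxor v k) && decide (PySem.Int.bxor v k < 256))).map
          (fun v => PySem.Int.bxor v k)))
        (fun x => x) false
      if plaintexts.isEmpty then acc else acc ++ [(nv.1, plaintexts)]) =
      (fun acc nv => if (pvL k nv.2).isEmpty then acc else acc ++ [(nv.1, pvL k nv.2)]) := by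
    funext acc nv
    simp only [pvB1]
  rw [hfun]
  have hent : m.foldl (fun acc nv => if (pvL k nv.2).isEmpty then acc
      else acc ++ [(nv.1, pvL k nv.2)]) [] = pvEnts k m := by
    simpa using pvFoldEnts k m []
  rw [hent]
  show (PySem.Dict.ofList (PySem.List.sorted (pvEnts k m) (fun e => e.2.headI) false)).items =
    pvStateA k 256 m
  rw [pvSortedGrouped (pvEnts k m) (pvEnts_prop k m)]
  have hperm : ((PySem.List.pyRange 0 256 1).flatMap
      (fun p => (pvEnts k m).filter (fun e => e.2.head? == some p))).Perm (pvEnts k m) := by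
    rw [← pvSortedGrouped (pvEnts k m) (pvEnts_prop k m)]
    exact PySem.List.sorted_perm (pvEnts k m) (fun e => e.2.headI) false
  have hnodup : (((PySem.List.pyRange 0 256 1).flatMap
      (fun p => (pvEnts k m).filter (fun e => e.2.head? == some p))).map Prod.fst).Nodup :=
    ((hperm.map Prod.fst).nodup_iff).2 (pvEnts_keys_nodup k m hm)
  rw [pvOfListItems _ hnodup, pvGroups_eq]

-- ===== VERDICT (by name: the statement is the Claim_ definition above) =====
theorem processingSecondKeyByte_spec : Claim_equal_processingSecondKeyByte := by
  intro k m _hdom hpre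
  unfold Spec_processingSecondKeyByte
  rw [pvA_eq k m hpre, pvB_eq k m hpre]
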